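-- pv_equiv track=rewrite | github.com/GhostN3xus/OverApi | overapi/tools/wordlist_manager.py | filter_wordlist
-- ===== SOURCE A (Python) =====
-- from typing import List, Dict, Optional, Set
--
-- def filter_wordlist(wordlist: List[str], min_length: Optional[int] = None,
--                    max_length: Optional[int] = None,
--                    contains: Optional[str] = None,
--                    starts_with: Optional[str] = None,
--                    ends_with: Optional[str] = None) -> List[str]:
--     """
--     Filter wordlist based on criteria.
--
--     Args:
--         wordlist: Input wordlist
--         min_length: Minimum word length
--         max_length: Maximum word length
--         contains: Must contain this substring
--         starts_with: Must start with this string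
--         ends_with: Must end with this string
--
--     Returns:
--         Filtered wordlist
--     """
--     filtered = wordlist
--
--     if min_length is not None:
--         filtered = [w for w in filtered if len(w) >= min_length]
--
--     if max_length is not None:
--         filtered = [w for w in filtered if len(w) <= max_length]
--
--     if contains is not None:
--         filtered = [w for w in filtered if contains in w]
--
--     if starts_with is not None:
--         filtered = [w for w in filtered if w.startswith(starts_with)]
--
--     if ends_with is not None:
--         filtered = [w for w in filtered if w.endswith(ends_with)]
--
--     return filtered
-- ===== SOURCE B (Python) =====
-- from typing import List, Optional
--
-- def filter_wordlist(wordlist: List[str], min_length: Optional[int] = None,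
--                     max_length: Optional[int] = None,
--                     contains: Optional[str] = None,
--                     starts_with: Optional[str] = None,
--                     ends_with: Optional[str] = None) -> List[str]:
--     preds = []
--     if min_length is not None:
--         preds.append(lambda w: len(w) >= min_length)
--     if max_length is not None:
--         preds.append(lambda w: len(w) <= max_length)
--     if contains is not None:
--         preds.append(lambda w: contains in w)
--     if starts_with is not None:
--         preds.append(lambda w: w.startswith(starts_with))
--     if ends_with is not None:
--         preds.append(lambda w: w.endswith(ends_with))
--     if not preds:
--         return wordlist
--     return [w for w in wordlist if all(p(w) for p in preds)]
-- ===== Notes on version B (the rewrite author's own statement) =====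
-- stated objective: simpler
-- what changed: B builds the list of active predicates once and filters in a single pass (returning the input list unchanged when no criterion is active), instead of A's up to five successive list rebuilds.
import Mathlib
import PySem

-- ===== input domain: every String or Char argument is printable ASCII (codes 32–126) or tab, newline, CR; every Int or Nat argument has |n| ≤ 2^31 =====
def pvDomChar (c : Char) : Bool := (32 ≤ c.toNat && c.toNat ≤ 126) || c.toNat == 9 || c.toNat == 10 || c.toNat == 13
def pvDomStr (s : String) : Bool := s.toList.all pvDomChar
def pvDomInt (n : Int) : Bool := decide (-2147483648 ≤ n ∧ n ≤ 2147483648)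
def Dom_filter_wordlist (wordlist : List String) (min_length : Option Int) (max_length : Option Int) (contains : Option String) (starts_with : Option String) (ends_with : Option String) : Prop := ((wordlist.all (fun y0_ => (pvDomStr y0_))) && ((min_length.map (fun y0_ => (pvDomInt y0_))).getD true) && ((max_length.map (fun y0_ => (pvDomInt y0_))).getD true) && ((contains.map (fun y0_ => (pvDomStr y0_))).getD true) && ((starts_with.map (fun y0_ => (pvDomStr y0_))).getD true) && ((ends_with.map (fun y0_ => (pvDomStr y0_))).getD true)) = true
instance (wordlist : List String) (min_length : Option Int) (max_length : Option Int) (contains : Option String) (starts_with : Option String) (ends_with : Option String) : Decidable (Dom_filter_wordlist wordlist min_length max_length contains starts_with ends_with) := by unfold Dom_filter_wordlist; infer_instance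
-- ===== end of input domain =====

-- B builds the list of active predicates once and makes a single filtering pass
-- (returning the input list itself when no criterion is active), instead of A's
-- five successive list rebuilds; objective: simpler (one pass, one comprehension).

-- ===== PORT A =====
-- A: start from the input and apply one filtering pass per non-None criterion, in order.
def filter_wordlist (wordlist : List String) (min_length : Option Int) (max_length : Option Int) (contains : Option String) (starts_with : Option String) (ends_with : Option String) : List String :=
  let filtered := wordlist
  let filtered := match min_length with
    | none => filtered
    | some m => filtered.filter (fun w => (PySem.Str.len w : Int) ≥ m)
  let filtered := match max_length with
    | none => filtered
    | some m => filtered.filter (fun w => (PySem.Str.len w : Int) ≤ m)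
  let filtered := match contains with
    | none => filtered
    | some c => filtered.filter (fun w => PySem.Str.isIn c w)
  let filtered := match starts_with with
    | none => filtered
    | some p => filtered.filter (fun w => PySem.Str.startswith w p)
  let filtered := match ends_with with
    | none => filtered
    | some p => filtered.filter (fun w => PySem.Str.endswith w p)
  filtered

-- ===== PORT B =====
-- B: collect the active predicates, then one pass; the input list itself if none are active.
def pvPreds (min_length : Option Int) (max_length : Option Int) (contains : Option String) (starts_with : Option String) (ends_with : Option String) : List (String → Bool) :=
  (match min_length with | none => [] | some m => [fun w => (PySem.Str.len w : Int) ≥ m]) ++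
  (match max_length with | none => [] | some m => [fun w => (PySem.Str.len w : Int) ≤ m]) ++
  (match contains with | none => [] | some c => [fun w => PySem.Str.isIn c w]) ++
  (match starts_with with | none => [] | some p => [fun w => PySem.Str.startswith w p]) ++
  (match ends_with with | none => [] | some p => [fun w => PySem.Str.endswith w p])

def filter_wordlist_alt (wordlist : List String) (min_length : Option Int) (max_length : Option Int) (contains : Option String) (starts_with : Option String) (ends_with : Option String) : List String :=
  let preds := pvPreds min_length max_length contains starts_with ends_with
  if preds.isEmpty then wordlist
  else wordlist.filter (fun w => preds.all (fun p => p w))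

-- ===== PRECONDITION & SPEC =====
def Spec_filter_wordlist (wordlist : List String) (min_length : Option Int) (max_length : Option Int) (contains : Option String) (starts_with : Option String) (ends_with : Option String) (out : List String) : Prop := out = filter_wordlist_alt wordlist min_length max_length contains starts_with ends_with
instance (wordlist : List String) (min_length : Option Int) (max_length : Option Int) (contains : Option String) (starts_with : Option String) (ends_with : Option String) (out : List String) : Decidable (Spec_filter_wordlist wordlist min_length max_length contains starts_with ends_with out) := by unfold Spec_filter_wordlist; infer_instance

-- ===== CLAIM (what is proved, stated in full; the proofs are below) =====
def Claim_equal_filter_wordlist : Prop := ∀ (wordlist : List String) (min_length : Option Int) (max_length : Option Int) (contains : Option String) (starts_with : Option String) (ends_with : Option String), Dom_filter_wordlist wordlist min_length max_length contains starts_with ends_with → Spec_filter_wordlist wordlist min_length max_length contains starts_with ends_with (filter_wordlist wordlist min_length max_length contains starts_with ends_with)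

-- ===== LEMMAS AND PROOFS =====

-- Sequential filters equal one filter by the conjunction of the predicates.
theorem seq_filter_eq (xs : List String) (ps : List (String → Bool)) :
    ps.foldl (fun acc p => acc.filter p) xs = xs.filter (fun w => ps.all (fun p => p w)) := by
  induction ps generalizing xs with
  | nil => simp
  | cons p ps ih =>
      simp only [List.foldl_cons, ih, List.filter_filter, List.all_cons]
      congr 1
      funext w
      exact Bool.and_comm _ _

-- A's successive passes are exactly the left fold of filtering by each active predicate.
theorem a_eq_foldl (wordlist : List String) (min_length : Option Int) (max_length : Option Int) (contains : Option String) (starts_with : Option String) (ends_with : Option String) :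
    filter_wordlist wordlist min_length max_length contains starts_with ends_with =
      (pvPreds min_length max_length contains starts_with ends_with).foldl (fun acc p => acc.filter p) wordlist := by
  rcases min_length with _ | m <;> rcases max_length with _ | x <;> rcases contains with _ | c <;>
    rcases starts_with with _ | s <;> rcases ends_with with _ | e <;> rfl

-- ===== VERDICT (by name: the statement is the Claim_ definition above) =====
theorem filter_wordlist_spec : Claim_equal_filter_wordlist := by
  intro wl ml xl c sw ew _
  show filter_wordlist wl ml xl c sw ew = filter_wordlist_alt wl ml xl c sw ew
  rw [a_eq_foldl, seq_filter_eq, filter_wordlist_alt]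
  by_cases h : (pvPreds ml xl c sw ew).isEmpty
  · rw [List.isEmpty_iff] at h
    simp [h]
  · simp [h]
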